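-- pv_equiv track=rewrite | github.com/tghanchidnx/Databridge_AI | src/hierarchy/flexible_import.py | _normalize_tier_2_columns
-- ===== SOURCE A (Python) =====
-- from typing import Dict, List, Any, Optional, Tuple
--
-- def _normalize_tier_2_columns(columns: List[str]) -> Dict[str, str]:
--     """Map various column names to standard Tier 2 names."""
--     col_map = {}
--     cols_lower = {c.lower(): c for c in columns}
--
--     mappings = {
--         "hierarchy_name": ["hierarchy_name", "name", "hierarchy"],
--         "parent_name": ["parent_name", "parent", "parent_hierarchy"],
--         "source_value": ["source_value", "value", "account_code", "code"],
--         "sort_order": ["sort_order", "order", "sequence", "sort"],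
--         "description": ["description", "desc", "notes"],
--         "template_id": ["template_id", "template"],
--     }
--
--     for standard, candidates in mappings.items():
--         for candidate in candidates:
--             if candidate in cols_lower:
--                 col_map[standard] = cols_lower[candidate]
--                 break
--
--     return col_map
-- ===== SOURCE B (Python) =====
-- def _normalize_tier_2_columns(columns):
--     """Map various column names to standard Tier 2 names."""
--     mappings = {
--         "hierarchy_name": ["hierarchy_name", "name", "hierarchy"],
--         "parent_name": ["parent_name", "parent", "parent_hierarchy"],
--         "source_value": ["source_value", "value", "account_code", "code"],
--         "sort_order": ["sort_order", "order", "sequence", "sort"],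
--         "description": ["description", "desc", "notes"],
--         "template_id": ["template_id", "template"],
--     }
--     # Inverted index built once: candidate (lowercase) -> (standard, priority).
--     index = {}
--     for standard, candidates in mappings.items():
--         for priority, candidate in enumerate(candidates):
--             index[candidate] = (standard, priority)
--     # Single column-driven pass: keep, per standard, the best-priority hit;
--     # on equal priority (same candidate) the later column overwrites.
--     best = {}
--     for col in columns:
--         hit = index.get(col.lower())
--         if hit is None:
--             continue
--         standard, priority = hit
--         cur = best.get(standard)
--         if cur is None or priority <= cur[0]:
--             best[standard] = (priority, col)
--     return {standard: best[standard][1] for standard in mappings if standard in best}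
-- ===== Notes on version B (the rewrite author's own statement) =====
-- stated objective: alternative
-- what changed: B flattens the mappings table once into an inverted candidate->(standard,priority) index and then makes a single column-driven pass keeping the best-priority hit per standard (later column wins ties), instead of A's build-a-lowercase-dict-then-probe-each-candidate-per-standard nested scan.
import Mathlib
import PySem

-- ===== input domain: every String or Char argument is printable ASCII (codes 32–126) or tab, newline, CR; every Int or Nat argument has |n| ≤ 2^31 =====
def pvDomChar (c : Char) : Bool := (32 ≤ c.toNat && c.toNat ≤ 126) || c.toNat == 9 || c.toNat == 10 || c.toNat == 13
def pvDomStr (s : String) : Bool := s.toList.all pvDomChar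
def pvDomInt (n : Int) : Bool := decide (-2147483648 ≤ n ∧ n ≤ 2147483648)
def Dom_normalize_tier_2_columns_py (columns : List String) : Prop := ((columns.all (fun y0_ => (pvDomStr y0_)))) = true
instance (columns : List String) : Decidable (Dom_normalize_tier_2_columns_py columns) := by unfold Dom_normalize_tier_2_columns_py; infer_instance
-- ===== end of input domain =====

-- B replaces A's lowercase-dict + per-standard candidate probing by a prebuilt inverted
-- candidate->(standard,priority) index and a single column-driven pass (alternative decomposition).


-- the shared literal table 'mappings' of both Pythons
def pvMappings : List (String × List String) :=
  [("hierarchy_name", ["hierarchy_name", "name", "hierarchy"]),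
   ("parent_name", ["parent_name", "parent", "parent_hierarchy"]),
   ("source_value", ["source_value", "value", "account_code", "code"]),
   ("sort_order", ["sort_order", "order", "sequence", "sort"]),
   ("description", ["description", "desc", "notes"]),
   ("template_id", ["template_id", "template"])]

-- ===== PORT A =====
-- 'cols_lower = {c.lower(): c for c in columns}'
def pvColsLower (columns : List String) : PySem.Dict String String :=
  columns.foldl (fun d c => d.insert (PySem.Str.lower c) c) PySem.Dict.empty

-- inner 'for candidate in candidates: if candidate in cols_lower: col_map[standard] = cols_lower[candidate]; break'
def pvScanA (colsLower : PySem.Dict String String) (standard : String)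
    (colMap : PySem.Dict String String) : List String → PySem.Dict String String
  | [] => colMap
  | cand :: rest =>
    match colsLower.get? cand with
    | some v => colMap.insert standard v
    | none => pvScanA colsLower standard colMap rest

def normalize_tier_2_columns_py (columns : List String) : List (String × String) :=
  let colsLower := pvColsLower columns
  (pvMappings.foldl (fun colMap p => pvScanA colsLower p.1 colMap p.2) PySem.Dict.empty).items

-- ===== PORT B =====
-- 'index[candidate] = (standard, priority)' over the flattened (enumerated) table
def pvIndexB : PySem.Dict String (String × Int) :=
  pvMappings.foldl
    (fun d p => (PySem.List.enumerate p.2).foldl (fun d pc => d.insert pc.2 (p.1, pc.1)) d)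
    PySem.Dict.empty

-- one step of the column-driven pass over 'best'
def pvBestStep (index : PySem.Dict String (String × Int))
    (b : PySem.Dict String (Int × String)) (col : String) : PySem.Dict String (Int × String) :=
  match index.get? (PySem.Str.lower col) with
  | none => b
  | some hit =>
    match b.get? hit.1 with
    | none => b.insert hit.1 (hit.2, col)
    | some cur => if hit.2 ≤ cur.1 then b.insert hit.1 (hit.2, col) else b

def normalize_tier_2_columns_py_alt (columns : List String) : List (String × String) :=
  let best := columns.foldl (pvBestStep pvIndexB) PySem.Dict.empty
  (pvMappings.foldl
    (fun out p =>
      match best.get? p.1 with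
      | some pv => out.insert p.1 pv.2
      | none => out)
    PySem.Dict.empty).items

-- ===== PRECONDITION & SPEC =====
def Spec_normalize_tier_2_columns_py (columns : List String) (out : List (String × String)) : Prop := out = normalize_tier_2_columns_py_alt columns
instance (columns : List String) (out : List (String × String)) : Decidable (Spec_normalize_tier_2_columns_py columns out) := by unfold Spec_normalize_tier_2_columns_py; infer_instance

-- ===== CLAIM (what is proved, stated in full; the proofs are below) =====
def Claim_equal_normalize_tier_2_columns_py : Prop := ∀ (columns : List String), Dom_normalize_tier_2_columns_py columns → Spec_normalize_tier_2_columns_py columns (normalize_tier_2_columns_py columns)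

-- ===== LEMMAS AND PROOFS =====

-- proof-side spec functions -------------------------------------------------

-- position of k in a candidate list
def pvIdx (k : String) : List String → Option Nat
  | [] => none
  | y :: ys => if y = k then some 0 else (pvIdx k ys).map (· + 1)

-- what the inverted index answers for a key (first table entry whose list contains it)
def pvLookup (k : String) : Option (String × Int) :=
  pvMappings.findSome? (fun p => (pvIdx k p.2).map (fun i => (p.1, (i : Int))))

-- effect of one column on one standard
def pvEffS (s : String) (col : String) : Option (Int × String) :=
  match pvLookup (PySem.Str.lower col) with
  | some q => if q.1 = s then some (q.2, col) else none
  | none => none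

-- combine earlier choice (left) with later choice (right); right wins ties
def pvComb : Option (Int × String) → Option (Int × String) → Option (Int × String)
  | a, none => a
  | none, some b => some b
  | some a, some b => if b.1 ≤ a.1 then some b else some a

-- per-standard choice over a column list, column-driven
def pvChoose (s : String) : List String → Option (Int × String)
  | [] => none
  | x :: xs => pvComb (pvEffS s x) (pvChoose s xs)

-- last column (in order) whose lowercase equals k
def pvLast (k : String) : List String → Option String
  | [] => none
  | x :: xs =>
    match pvLast k xs with
    | some v => some v
    | none => if k = PySem.Str.lower x then some x else none

-- candidate-driven choice: first candidate with a match, with its position and last match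
def pvAFull (D : String → Option String) : List String → Option (Nat × String)
  | [] => none
  | c :: rest =>
    match D c with
    | some v => some (0, v)
    | none => (pvAFull D rest).map (fun q => (q.1 + 1, q.2))

-- lemmas ---------------------------------------------------------------------

theorem pvComb_none_right (a : Option (Int × String)) : pvComb a none = a := by
  cases a <;> rfl

theorem pvComb_assoc (a b c : Option (Int × String)) :
    pvComb (pvComb a b) c = pvComb a (pvComb b c) := by
  rcases a with _|a <;> rcases b with _|b <;> rcases c with _|c <;>
    simp [pvComb] <;> split_ifs <;> simp [pvComb] <;> split_ifs <;> first | rfl | omega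

-- the inverted index as a literal dict
theorem pvIndexB_eq_lit : pvIndexB = PySem.Dict.mk
  [("hierarchy_name", ("hierarchy_name", 0)), ("name", ("hierarchy_name", 1)), ("hierarchy", ("hierarchy_name", 2)),
   ("parent_name", ("parent_name", 0)), ("parent", ("parent_name", 1)), ("parent_hierarchy", ("parent_name", 2)),
   ("source_value", ("source_value", 0)), ("value", ("source_value", 1)), ("account_code", ("source_value", 2)), ("code", ("source_value", 3)),
   ("sort_order", ("sort_order", 0)), ("order", ("sort_order", 1)), ("sequence", ("sort_order", 2)), ("sort", ("sort_order", 3)),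
   ("description", ("description", 0)), ("desc", ("description", 1)), ("notes", ("description", 2)),
   ("template_id", ("template_id", 0)), ("template", ("template_id", 1))] := by rfl

-- the inverted index answers pvLookup
theorem pvIndexB_get (k : String) : pvIndexB.get? k = pvLookup k := by
  rw [pvIndexB_eq_lit]
  by_cases h0 : "hierarchy_name" = k
  · subst h0; rfl
  by_cases h1 : "name" = k
  · subst h1; rfl
  by_cases h2 : "hierarchy" = k
  · subst h2; rfl
  by_cases h3 : "parent_name" = k
  · subst h3; rfl
  by_cases h4 : "parent" = k
  · subst h4; rfl
  by_cases h5 : "parent_hierarchy" = k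
  · subst h5; rfl
  by_cases h6 : "source_value" = k
  · subst h6; rfl
  by_cases h7 : "value" = k
  · subst h7; rfl
  by_cases h8 : "account_code" = k
  · subst h8; rfl
  by_cases h9 : "code" = k
  · subst h9; rfl
  by_cases h10 : "sort_order" = k
  · subst h10; rfl
  by_cases h11 : "order" = k
  · subst h11; rfl
  by_cases h12 : "sequence" = k
  · subst h12; rfl
  by_cases h13 : "sort" = k
  · subst h13; rfl
  by_cases h14 : "description" = k
  · subst h14; rfl
  by_cases h15 : "desc" = k
  · subst h15; rfl
  by_cases h16 : "notes" = k
  · subst h16; rfl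
  by_cases h17 : "template_id" = k
  · subst h17; rfl
  by_cases h18 : "template" = k
  · subst h18; rfl
  simp [PySem.Dict.get?_mk_cons, PySem.Dict.get?_empty, pvLookup, pvMappings, pvIdx,
    List.findSome?_cons, h0, h1, h2, h3, h4, h5, h6, h7, h8, h9, h10, h11, h12, h13, h14, h15, h16, h17, h18]
  rfl

-- per-standard consistency of pvLookup with the table row
theorem pvLookup_row (k : String) (p : String × List String) (hp : p ∈ pvMappings) :
    (match pvLookup k with
     | some q => if q.1 = p.1 then some q.2 else none
     | none => none) = (pvIdx k p.2).map (fun n => ((n : Int))) := by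
  revert p hp
  by_cases h0 : "hierarchy_name" = k
  · subst h0; intro p hp; fin_cases hp <;> rfl
  by_cases h1 : "name" = k
  · subst h1; intro p hp; fin_cases hp <;> rfl
  by_cases h2 : "hierarchy" = k
  · subst h2; intro p hp; fin_cases hp <;> rfl
  by_cases h3 : "parent_name" = k
  · subst h3; intro p hp; fin_cases hp <;> rfl
  by_cases h4 : "parent" = k
  · subst h4; intro p hp; fin_cases hp <;> rfl
  by_cases h5 : "parent_hierarchy" = k
  · subst h5; intro p hp; fin_cases hp <;> rfl
  by_cases h6 : "source_value" = k
  · subst h6; intro p hp; fin_cases hp <;> rfl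
  by_cases h7 : "value" = k
  · subst h7; intro p hp; fin_cases hp <;> rfl
  by_cases h8 : "account_code" = k
  · subst h8; intro p hp; fin_cases hp <;> rfl
  by_cases h9 : "code" = k
  · subst h9; intro p hp; fin_cases hp <;> rfl
  by_cases h10 : "sort_order" = k
  · subst h10; intro p hp; fin_cases hp <;> rfl
  by_cases h11 : "order" = k
  · subst h11; intro p hp; fin_cases hp <;> rfl
  by_cases h12 : "sequence" = k
  · subst h12; intro p hp; fin_cases hp <;> rfl
  by_cases h13 : "sort" = k
  · subst h13; intro p hp; fin_cases hp <;> rfl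
  by_cases h14 : "description" = k
  · subst h14; intro p hp; fin_cases hp <;> rfl
  by_cases h15 : "desc" = k
  · subst h15; intro p hp; fin_cases hp <;> rfl
  by_cases h16 : "notes" = k
  · subst h16; intro p hp; fin_cases hp <;> rfl
  by_cases h17 : "template_id" = k
  · subst h17; intro p hp; fin_cases hp <;> rfl
  by_cases h18 : "template" = k
  · subst h18; intro p hp; fin_cases hp <;> rfl
  have hnone : pvLookup k = none := by
    simp [pvLookup, pvMappings, pvIdx, List.findSome?_cons, h0, h1, h2, h3, h4, h5, h6, h7, h8, h9, h10, h11, h12, h13, h14, h15, h16, h17, h18]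
  intro p hp
  rw [hnone]
  fin_cases hp <;> simp [pvIdx, h0, h1, h2, h3, h4, h5, h6, h7, h8, h9, h10, h11, h12, h13, h14, h15, h16, h17, h18]

-- one pvBestStep seen through get? s
theorem pvBestStep_get (b : PySem.Dict String (Int × String)) (x s : String) :
    (pvBestStep pvIndexB b x).get? s = pvComb (b.get? s) (pvEffS s x) := by
  unfold pvBestStep pvEffS
  rw [pvIndexB_get]
  cases hq : pvLookup (PySem.Str.lower x) with
  | none => rw [pvComb_none_right]
  | some q =>
    by_cases hqs : q.1 = s
    · subst hqs
      cases hb : b.get? q.1 with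
      | none => simp [pvComb, hb, PySem.Dict.get?_insert_self]
      | some cur =>
        by_cases hle : q.2 ≤ cur.1
        · simp [pvComb, hb, hle, PySem.Dict.get?_insert_self]
        · simp [pvComb, hb, hle]
    · have hne : s ≠ q.1 := fun h => hqs h.symm
      simp only [if_neg hqs, pvComb_none_right]
      cases hb : b.get? q.1 with
      | none => simpa [hb] using PySem.Dict.get?_insert_of_ne _ _ hne
      | some cur =>
        by_cases hle : q.2 ≤ cur.1
        · simpa [hb, hle] using PySem.Dict.get?_insert_of_ne _ _ hne
        · simp [hb, hle]

-- the whole best-fold seen through get? s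
theorem pvBest_get (s : String) (xs : List String) (b : PySem.Dict String (Int × String)) :
    (xs.foldl (pvBestStep pvIndexB) b).get? s = pvComb (b.get? s) (pvChoose s xs) := by
  induction xs generalizing b with
  | nil => simp [pvChoose, pvComb_none_right]
  | cons x xs ih =>
    simp only [List.foldl_cons, pvChoose]
    rw [ih, pvBestStep_get, pvComb_assoc]

-- cols_lower lookups are pvLast
theorem pvColsLower_get_aux (xs : List String) (d : PySem.Dict String String) (k : String) :
    (xs.foldl (fun d c => d.insert (PySem.Str.lower c) c) d).get? k =
      match pvLast k xs with
      | some v => some v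
      | none => d.get? k := by
  induction xs generalizing d with
  | nil => simp [pvLast]
  | cons x xs ih =>
    simp only [List.foldl_cons, pvLast, ih]
    cases pvLast k xs with
    | some v => rfl
    | none => rw [PySem.Dict.get?_insert]; split_ifs <;> rfl

theorem pvColsLower_get (xs : List String) (k : String) :
    (pvColsLower xs).get? k = pvLast k xs := by
  unfold pvColsLower
  rw [pvColsLower_get_aux]
  cases pvLast k xs <;> simp [PySem.Dict.get?_empty]

-- key step: pushing one earlier column into the candidate-driven choice
theorem pvAFull_step (cs : List String) (x : String) (xs : List String) :
    pvComb ((pvIdx (PySem.Str.lower x) cs).map (fun p => (((p : Int)), x)))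
      ((pvAFull (pvLast · xs) cs).map (fun q => (((q.1 : Int)), q.2)))
      = (pvAFull (pvLast · (x :: xs)) cs).map (fun q => (((q.1 : Int)), q.2)) := by
  induction cs with
  | nil => rfl
  | cons c rest ih =>
    by_cases hc : c = PySem.Str.lower x
    · simp only [pvIdx, if_pos hc, pvAFull, Option.map_some]
      have hlx : pvLast c (x :: xs) =
          match pvLast c xs with
          | some v => some v
          | none => some x := by
        simp only [pvLast, if_pos hc]
      cases hl : pvLast c xs with
      | some v =>
        rw [hlx, hl]
        simp [pvComb]
      | none =>
        rw [hlx, hl]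
        cases hr : pvAFull (pvLast · xs) rest with
        | none => simp [pvComb]
        | some q =>
          have : ¬ (((q.1 : Int)) + 1 ≤ 0) := by omega
          simp [pvComb, pvAFull, this]
    · have hlx : pvLast c (x :: xs) = pvLast c xs := by
        simp only [pvLast, if_neg (fun h => hc h)]
        cases pvLast c xs <;> simp
      simp only [pvIdx, if_neg hc, pvAFull, hlx]
      cases hl : pvLast c xs with
      | some v =>
        cases hi : pvIdx (PySem.Str.lower x) rest <;>
          simp [pvComb, Int.natCast_nonneg, pvComb_none_right] <;> omega
      | none =>
        have h := ih
        cases hi : pvIdx (PySem.Str.lower x) rest <;> rw [hi] at h <;>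
          cases hr : pvAFull (pvLast · xs) rest <;> rw [hr] at h <;>
            cases hr2 : pvAFull (pvLast · (x :: xs)) rest <;> rw [hr2] at h
        all_goals try simp [pvComb] at h
        all_goals try simp [pvComb]
        all_goals try split_ifs at h
        all_goals try split_ifs
        all_goals try simp_all
        all_goals omega

-- pvEffS of a table row, through pvLookup_row
theorem pvEffS_eq (p : String × List String) (hp : p ∈ pvMappings) (col : String) :
    pvEffS p.1 col = (pvIdx (PySem.Str.lower col) p.2).map (fun n => (((n : Int)), col)) := by
  have h := pvLookup_row (PySem.Str.lower col) p hp
  unfold pvEffS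
  cases hq : pvLookup (PySem.Str.lower col) with
  | none =>
    rw [hq] at h
    cases hpv : pvIdx (PySem.Str.lower col) p.2 <;> rw [hpv] at h <;> simp_all
  | some q =>
    rw [hq] at h
    by_cases hqs : q.1 = p.1 <;>
      simp only [if_pos, if_neg, hqs] at h ⊢ <;>
        cases hpv : pvIdx (PySem.Str.lower col) p.2 <;> rw [hpv] at h <;> simp_all

-- no columns: no choice
theorem pvAFull_nil (cs : List String) : pvAFull (pvLast · []) cs = none := by
  have aux : ∀ cs : List String, pvAFull (fun _ => (none : Option String)) cs = none := by
    intro cs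
    induction cs with
    | nil => rfl
    | cons c rest ih => simp [pvAFull, ih]
  simpa [pvLast] using aux cs

-- per table row: column-driven choice = candidate-driven choice
theorem pvChoose_eq_pvAFull (p : String × List String) (hp : p ∈ pvMappings) (xs : List String) :
    pvChoose p.1 xs = (pvAFull (pvLast · xs) p.2).map (fun q => (((q.1 : Int)), q.2)) := by
  induction xs with
  | nil => simp [pvChoose, pvAFull_nil]
  | cons x xs ih =>
    simp only [pvChoose, ih, pvEffS_eq p hp]
    exact pvAFull_step p.2 x xs

-- A's inner scan through pvAFull
theorem pvScanA_eq (D : PySem.Dict String String) (s : String)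
    (m : PySem.Dict String String) (cs : List String) :
    pvScanA D s m cs =
      match pvAFull (fun c => D.get? c) cs with
      | some q => m.insert s q.2
      | none => m := by
  induction cs with
  | nil => rfl
  | cons c rest ih =>
    simp only [pvScanA, pvAFull]
    cases D.get? c with
    | some v => rfl
    | none => rw [ih]; cases pvAFull (fun c => D.get? c) rest <;> rfl

-- one table row, A's scan = B's best read-off
theorem pvStep_eq (xs : List String) (p : String × List String) (hp : p ∈ pvMappings)
    (m : PySem.Dict String String) :
    pvScanA (pvColsLower xs) p.1 m p.2 =
      match (xs.foldl (pvBestStep pvIndexB) PySem.Dict.empty).get? p.1 with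
      | some pv => m.insert p.1 pv.2
      | none => m := by
  rw [pvScanA_eq]
  have hD : (fun c => (pvColsLower xs).get? c) = (pvLast · xs) :=
    funext (fun c => pvColsLower_get xs c)
  rw [hD, pvBest_get p.1 xs PySem.Dict.empty]
  rw [show PySem.Dict.empty.get? p.1 = (none : Option (Int × String)) from rfl]
  rw [show pvComb none (pvChoose p.1 xs) = pvChoose p.1 xs from by
    cases pvChoose p.1 xs <;> rfl]
  rw [pvChoose_eq_pvAFull p hp xs]
  cases pvAFull (pvLast · xs) p.2 <;> rfl

-- both final folds agree row by row
theorem pvAssemble (xs : List String) (L : List (String × List String))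
    (hmem : ∀ p ∈ L, p ∈ pvMappings) (m : PySem.Dict String String) :
    L.foldl (fun colMap p => pvScanA (pvColsLower xs) p.1 colMap p.2) m =
      L.foldl (fun out p =>
        match (xs.foldl (pvBestStep pvIndexB) PySem.Dict.empty).get? p.1 with
        | some pv => out.insert p.1 pv.2
        | none => out) m := by
  induction L generalizing m with
  | nil => rfl
  | cons p L ihL =>
    simp only [List.foldl_cons]
    rw [pvStep_eq xs p (hmem p (List.mem_cons_self ..)) m]
    exact ihL (fun q hq => hmem q (List.mem_cons_of_mem _ hq)) _

-- ===== VERDICT (by name: the statement is the Claim_ definition above) =====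
theorem normalize_tier_2_columns_py_spec : Claim_equal_normalize_tier_2_columns_py := by
  intro columns _
  unfold Spec_normalize_tier_2_columns_py normalize_tier_2_columns_py normalize_tier_2_columns_py_alt
  exact congrArg PySem.Dict.items
    (pvAssemble columns pvMappings (fun _ hp => hp) PySem.Dict.empty)
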